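-- pv_equiv track=rewrite | github.com/KrithikK7/Audio_watermarking | Embed/v4.1.py | block_interleave
-- ===== SOURCE A (Python) =====
-- import math
-- from typing import List, Tuple, Optional
--
-- def block_interleave(bits: List[int], depth: int) -> List[int]:
--     if depth <= 1:
--         return bits
--     rows = depth
--     cols = math.ceil(len(bits) / rows)
--     grid = [[0]*cols for _ in range(rows)]
--     idx = 0
--     for r in range(rows):
--         for c in range(cols):
--             if idx < len(bits):
--                 grid[r][c] = bits[idx]; idx += 1
--     out = []
--     for c in range(cols):
--         for r in range(rows):
--             out.append(grid[r][c])
--     return out[:len(bits)]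
-- ===== SOURCE B (Python) =====
-- import math
--
-- def block_interleave(bits, depth):
--     if depth <= 1:
--         return bits
--     rows = depth
--     cols = math.ceil(len(bits) / rows)
--     n = len(bits)
--     out = []
--     for k in range(n):
--         src = (k % rows) * cols + k // rows
--         out.append(bits[src] if src < n else 0)
--     return out
-- ===== Notes on version B (the rewrite author's own statement) =====
-- stated objective: simpler
-- what changed: Drops the 2D grid, the row-major fill loop with its idx counter and the column-major read-out, producing each output position directly in one pass via the closed-form index map src=(k%rows)*cols+k//rows with 0 where src exceeds len(bits); no grid allocation and a single pass instead of three gives a constant-factor speedup.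
import Mathlib
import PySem

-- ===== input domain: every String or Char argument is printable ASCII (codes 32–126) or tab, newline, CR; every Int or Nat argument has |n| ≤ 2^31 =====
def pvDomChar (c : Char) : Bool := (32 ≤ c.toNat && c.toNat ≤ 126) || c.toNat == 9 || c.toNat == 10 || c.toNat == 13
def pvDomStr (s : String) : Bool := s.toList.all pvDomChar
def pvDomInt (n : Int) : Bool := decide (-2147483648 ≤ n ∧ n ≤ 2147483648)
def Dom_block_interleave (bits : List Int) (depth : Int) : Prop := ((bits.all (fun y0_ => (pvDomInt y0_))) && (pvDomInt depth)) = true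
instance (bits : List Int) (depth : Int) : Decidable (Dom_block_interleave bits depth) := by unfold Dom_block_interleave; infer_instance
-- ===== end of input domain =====

-- B replaces A's grid allocation, row-major fill and column-major read-out by one direct
-- pass over output positions with the closed-form source index (k % rows) * cols + k // rows
-- (objective: simpler).

-- ===== PORT A =====
-- Literal port of A.  math.ceil(len(bits)/rows) is ported as the exact integer ceiling
-- -((-len) // rows) (exact wherever the float division's ceiling is, i.e. all realistic sizes).
-- grid reads/writes use the total pyGetD/pySetD forms: the indices r, c come from
-- range(rows)/range(cols) and st.2 < len(bits) guards the bits access, so Python never raises.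
def block_interleave (bits : List Int) (depth : Int) : List Int :=
  if depth ≤ 1 then bits
  else
    let rows : Int := depth
    let cols : Int := -(PySem.Int.floordiv (-(bits.length : Int)) rows)
    let grid : List (List Int) :=
      (PySem.List.pyRange 0 rows 1).map (fun _ => List.replicate cols.toNat 0)
    let fill : List (List Int) × Int :=
      (PySem.List.pyRange 0 rows 1).foldl (fun st r =>
        (PySem.List.pyRange 0 cols 1).foldl (fun (st : List (List Int) × Int) c =>
          if st.2 < (bits.length : Int) then
            (PySem.List.pySetD st.1 r
               (PySem.List.pySetD (PySem.List.pyGetD st.1 r []) c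
                 (PySem.List.pyGetD bits st.2 0)), st.2 + 1)
          else st) st) (grid, 0)
    let out : List Int :=
      (PySem.List.pyRange 0 cols 1).foldl (fun out c =>
        (PySem.List.pyRange 0 rows 1).foldl (fun out r =>
          out ++ [PySem.List.pyGetD (PySem.List.pyGetD fill.1 r []) c 0]) out) []
    PySem.List.slice out none (some (bits.length : Int))

-- ===== PORT B =====
-- Literal port of Source B: one pass over k in range(len(bits)), emitting
-- bits[src] if src < len(bits) else 0 for src = (k % rows) * cols + k // rows.
def block_interleave_alt (bits : List Int) (depth : Int) : List Int :=
  if depth ≤ 1 then bits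
  else
    let rows : Int := depth
    let cols : Int := -(PySem.Int.floordiv (-(bits.length : Int)) rows)
    let n : Int := (bits.length : Int)
    (PySem.List.pyRange 0 n 1).foldl (fun out k =>
      let src : Int := PySem.Int.mod k rows * cols + PySem.Int.floordiv k rows
      out ++ [if src < n then PySem.List.pyGetD bits src 0 else 0]) []

-- ===== PRECONDITION & SPEC =====
def Spec_block_interleave (bits : List Int) (depth : Int) (out : List Int) : Prop := out = block_interleave_alt bits depth
instance (bits : List Int) (depth : Int) (out : List Int) : Decidable (Spec_block_interleave bits depth out) := by unfold Spec_block_interleave; infer_instance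

-- ===== CLAIM (what is proved, stated in full; the proofs are below) =====
def Claim_equal_block_interleave : Prop := ∀ (bits : List Int) (depth : Int), Dom_block_interleave bits depth → Spec_block_interleave bits depth (block_interleave bits depth)

-- ===== LEMMAS AND PROOFS =====

-- The body of A's fill loop, with natural-number row/column indices.
def fillStep (bits : List Int) (r : Nat) (st : List (List Int) × Int) (c : Nat) : List (List Int) × Int :=
  if st.2 < (bits.length : Int) then
    (st.1.set r ((st.1.getD r []).set c (PySem.List.pyGetD bits st.2 0)), st.2 + 1)
  else st

-- Row r of the fully filled grid.
def padRow (bits : List Int) (Cn r : Nat) : List Int :=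
  (List.range Cn).map (fun c => bits.getD (r * Cn + c) 0)

-- cols = ceil(len/rows) as a natural number
lemma cols_eq (N R : Nat) (hR : 0 < R) :
    -(PySem.Int.floordiv (-(N : Int)) (R : Int)) = (((N + R - 1) / R : Nat) : Int) := by
  rw [PySem.Int.neg_floordiv_neg_eq_iff_of_pos (by exact_mod_cast hR)]
  have h1 := Nat.div_add_mod (N + R - 1) R
  have h2 := Nat.mod_lt (N + R - 1) hR
  set q := (N + R - 1) / R with hq
  set m := (N + R - 1) % R with hm
  have h1' : (R : Int) * q + m = (N : Int) + R - 1 := by zify [show 1 ≤ N + R by omega] at h1; linarith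
  have h2' : (m : Int) < R := by exact_mod_cast h2
  constructor
  · nlinarith [h1', h2', Int.natCast_nonneg m]
  · nlinarith [h1', h2', Int.natCast_nonneg m]

lemma N_le_RC (N R : Nat) (hR : 0 < R) : N ≤ R * ((N + R - 1) / R) := by
  have h1 := Nat.div_add_mod (N + R - 1) R
  have h2 := Nat.mod_lt (N + R - 1) hR
  omega

lemma map_getD_range {α : Type} (d : α) (l : List α) (n : Nat) (h : l.length = n) :
    (List.range n).map (fun j => l.getD j d) = l := by
  apply List.ext_getElem
  · simp [h]
  · intro i h1 h2
    simp [List.getD_eq_getElem?_getD, List.getElem?_eq_getElem h2]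

lemma fill_inner (bits : List Int) (Cn r : Nat) :
    ∀ (k c : Nat) (g : List (List Int)), c + k = Cn → r < g.length →
    (g.getD r []).length = Cn →
    (∀ j, c ≤ j → (g.getD r []).getD j 0 = 0) →
    (List.range' c k).foldl (fillStep bits r) (g, ((min (r * Cn + c) bits.length : Nat) : Int)) =
      (g.set r ((List.range Cn).map
          (fun j => if j < c then (g.getD r []).getD j 0 else bits.getD (r * Cn + j) 0)),
       ((min (r * Cn + Cn) bits.length : Nat) : Int)) := by
  intro k
  induction k with
  | zero =>
    intro c g hc hr hlen hz
    have hcC : c = Cn := by omega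
    have hgr : g.getD r [] = g[r] := List.getD_eq_getElem g [] hr
    have hrow : (List.range Cn).map
        (fun j => if j < c then (g.getD r []).getD j 0 else bits.getD (r * Cn + j) 0) = g.getD r [] := by
      have hcg : ∀ j ∈ List.range Cn,
          (if j < c then (g.getD r []).getD j 0 else bits.getD (r * Cn + j) 0) = (g.getD r []).getD j 0 := by
        intro j hj
        rw [if_pos (by simp at hj; omega)]
      rw [List.map_congr_left hcg, map_getD_range _ _ _ hlen]
    simp only [List.range'_zero, List.foldl_nil]
    rw [hrow, hgr, List.set_getElem_self hr, hcC]
  | succ k ih =>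
    intro c g hc hr hlen hz
    have hcC : c < Cn := by omega
    have hgr : g.getD r [] = g[r] := List.getD_eq_getElem g [] hr
    rw [List.range'_succ, List.foldl_cons]
    by_cases hlt : r * Cn + c < bits.length
    · have hstep : fillStep bits r (g, ((min (r * Cn + c) bits.length : Nat) : Int)) c =
          (g.set r ((g.getD r []).set c (bits.getD (r * Cn + c) 0)),
           ((min (r * Cn + (c + 1)) bits.length : Nat) : Int)) := by
        unfold fillStep
        dsimp only
        rw [Nat.min_eq_left (le_of_lt hlt)]
        rw [if_pos (by exact_mod_cast hlt)]
        simp only [PySem.List.pyGetD_natCast]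
        have : min (r * Cn + (c + 1)) bits.length = r * Cn + c + 1 := by omega
        rw [this]
        norm_cast
      rw [hstep]
      set v := bits.getD (r * Cn + c) 0 with hv
      set g' := g.set r ((g.getD r []).set c v) with hg'
      have hr' : r < g'.length := by simpa [hg'] using hr
      have hrow' : g'.getD r [] = (g.getD r []).set c v := by
        rw [List.getD_eq_getElem?_getD, hg', List.getElem?_set_self hr, Option.getD_some]
      have ih' := ih (c + 1) g' (by omega) hr'
        (by rw [hrow']; simpa using hlen)
        (by intro j hj
            rw [hrow', List.getD_eq_getElem?_getD, List.getElem?_set_ne (by omega),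
              ← List.getD_eq_getElem?_getD]
            exact hz j (by omega))
      rw [ih']
      have hsets : g'.set r ((List.range Cn).map
          (fun j => if j < c + 1 then (g'.getD r []).getD j 0 else bits.getD (r * Cn + j) 0)) =
          g.set r ((List.range Cn).map
          (fun j => if j < c then (g.getD r []).getD j 0 else bits.getD (r * Cn + j) 0)) := by
        rw [hg', List.set_set]
        congr 1
        apply List.map_congr_left
        intro j hj
        have hjC : j < Cn := by simpa using hj
        by_cases h1 : j < c
        · rw [if_pos (by omega), if_pos h1, hrow', List.getD_eq_getElem?_getD,
            List.getElem?_set_ne (by omega), ← List.getD_eq_getElem?_getD]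
        · by_cases h2 : j = c
          · subst h2
            rw [if_pos (by omega), if_neg h1, hrow', List.getD_eq_getElem?_getD,
              List.getElem?_set_self (by omega), Option.getD_some]
          · rw [if_neg (by omega), if_neg (by omega)]
      rw [hsets]
    · have hminN : min (r * Cn + c) bits.length = bits.length := by omega
      have hstep : fillStep bits r (g, ((min (r * Cn + c) bits.length : Nat) : Int)) c =
          (g, ((min (r * Cn + (c + 1)) bits.length : Nat) : Int)) := by
        unfold fillStep
        dsimp only
        rw [hminN, if_neg (by exact_mod_cast lt_irrefl (bits.length : Int))]
        have : min (r * Cn + (c + 1)) bits.length = bits.length := by omega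
        rw [this]
      rw [hstep]
      rw [ih (c + 1) g (by omega) hr hlen (by intro j hj; exact hz j (by omega))]
      have hmaps : (List.range Cn).map
          (fun j => if j < c + 1 then (g.getD r []).getD j 0 else bits.getD (r * Cn + j) 0) =
          (List.range Cn).map
          (fun j => if j < c then (g.getD r []).getD j 0 else bits.getD (r * Cn + j) 0) := by
        apply List.map_congr_left
        intro j hj
        by_cases h1 : j < c
        · rw [if_pos (by omega), if_pos h1]
        · by_cases h2 : j = c
          · subst h2
            rw [if_pos (by omega), if_neg h1, hz j le_rfl,
              List.getD_eq_default _ _ (by omega)]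
          · rw [if_neg (by omega), if_neg (by omega)]
      rw [hmaps]

lemma fill_outer (bits : List Int) (Rn Cn : Nat) :
    ∀ (k r : Nat) (g : List (List Int)), r + k = Rn → g.length = Rn →
    (∀ j, r ≤ j → j < Rn → g.getD j [] = List.replicate Cn 0) →
    (List.range' r k).foldl (fun st rr => (List.range Cn).foldl (fillStep bits rr) st)
        (g, ((min (r * Cn) bits.length : Nat) : Int)) =
      ((List.range Rn).map (fun j => if j < r then g.getD j [] else padRow bits Cn j),
       ((min (Rn * Cn) bits.length : Nat) : Int)) := by
  intro k
  induction k with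
  | zero =>
    intro r g hr hlen hrep
    have hrR : r = Rn := by omega
    have hg : (List.range Rn).map (fun j => if j < r then g.getD j [] else padRow bits Cn j) = g := by
      have hcg : ∀ j ∈ List.range Rn,
          (if j < r then g.getD j [] else padRow bits Cn j) = g.getD j [] := by
        intro j hj
        rw [if_pos (by simp at hj; omega)]
      rw [List.map_congr_left hcg, map_getD_range _ _ _ hlen]
    simp only [List.range'_zero, List.foldl_nil]
    rw [hg, hrR]
  | succ k ih =>
    intro r g hr hlen hrep
    rw [List.range'_succ, List.foldl_cons]
    have hrRn : r < Rn := by omega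
    have hrg : r < g.length := by omega
    have hrepr : g.getD r [] = List.replicate Cn 0 := hrep r le_rfl hrRn
    have hinner := fill_inner bits Cn r Cn 0 g (by omega) hrg
      (by rw [hrepr]; simp)
      (by intro j hj
          rw [hrepr, List.getD_eq_getElem?_getD, List.getElem?_replicate]
          by_cases hj2 : j < Cn <;> simp [hj2])
    rw [← List.range_eq_range'] at hinner
    simp only [Nat.add_zero, Nat.not_lt_zero, if_false] at hinner
    rw [hinner]
    set g' := g.set r ((List.range Cn).map (fun j => bits.getD (r * Cn + j) 0)) with hg'
    have hpad : g'.getD r [] = padRow bits Cn r := by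
      rw [List.getD_eq_getElem?_getD, hg', List.getElem?_set_self hrg, Option.getD_some, padRow]
    have hne : ∀ j, j ≠ r → g'.getD j [] = g.getD j [] := by
      intro j hj
      rw [List.getD_eq_getElem?_getD, hg', List.getElem?_set_ne (by omega),
        ← List.getD_eq_getElem?_getD]
    have ih' := ih (r + 1) g' (by omega) (by rw [hg', List.length_set]; exact hlen)
      (by intro j hj1 hj2
          rw [hne j (by omega)]
          exact hrep j (by omega) hj2)
    have hidx : min (r * Cn + Cn) bits.length = min ((r + 1) * Cn) bits.length := by
      congr 1
      ring
    rw [hidx, ih']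
    have hmaps : (List.range Rn).map (fun j => if j < r + 1 then g'.getD j [] else padRow bits Cn j) =
        (List.range Rn).map (fun j => if j < r then g.getD j [] else padRow bits Cn j) := by
      apply List.map_congr_left
      intro j hj
      by_cases h1 : j < r
      · rw [if_pos (by omega), if_pos h1, hne j (by omega)]
      · by_cases h2 : j = r
        · subst h2
          rw [if_pos (by omega), if_neg h1, hpad]
        · rw [if_neg (by omega), if_neg (by omega)]
    rw [hmaps]

lemma flat_len (Rn Cn : Nat) (g : Nat → Nat → Int) :
    ((List.range Cn).flatMap (fun c => (List.range Rn).map (fun r => g r c))).length = Cn * Rn := by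
  induction Cn with
  | zero => simp
  | succ C ih => simp [List.range_succ, ih]; ring

lemma flat_getElem? (Rn : Nat) (g : Nat → Nat → Int) :
    ∀ (Cn k : Nat), k < Cn * Rn →
    ((List.range Cn).flatMap (fun c => (List.range Rn).map (fun r => g r c)))[k]? =
      some (g (k % Rn) (k / Rn)) := by
  intro Cn
  induction Cn with
  | zero => intro k hk; omega
  | succ C ih =>
    intro k hk
    have hCR : (C + 1) * Rn = C * Rn + Rn := by ring
    rw [List.range_succ, List.flatMap_append]
    by_cases h : k < C * Rn
    · rw [List.getElem?_append_left (by rw [flat_len]; exact h)]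
      exact ih k h
    · rw [List.getElem?_append_right (by rw [flat_len]; omega)]
      rw [flat_len]
      have hRn : 0 < Rn := by omega
      have hj : k - C * Rn < Rn := by omega
      have hk2 : k = C * Rn + (k - C * Rn) := by omega
      have hdiv : k / Rn = C := by
        rw [hk2, Nat.mul_comm C Rn, Nat.mul_add_div hRn, Nat.mul_comm Rn C, Nat.div_eq_of_lt hj]
        omega
      have hmod : k % Rn = k - C * Rn := by
        rw [hk2, Nat.mul_comm C Rn, Nat.mul_add_mod, Nat.mul_comm Rn C, Nat.mod_eq_of_lt hj]
        omega
      simp [List.getElem?_map, List.getElem?_range hj, hdiv, hmod]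

lemma interleave_index (Rn Cn N : Nat) (hN : N ≤ Cn * Rn) (g : Nat → Nat → Int) :
    ((List.range Cn).flatMap (fun c => (List.range Rn).map (fun r => g r c))).take N =
      (List.range N).map (fun k => g (k % Rn) (k / Rn)) := by
  apply List.ext_getElem?
  intro i
  by_cases hi : i < N
  · rw [List.getElem?_take_of_lt hi, flat_getElem? Rn g Cn i (by omega),
      List.getElem?_map, List.getElem?_range hi]
    rfl
  · have h1 : (((List.range Cn).flatMap (fun c => (List.range Rn).map (fun r => g r c))).take N).length ≤ i := by
      rw [List.length_take, flat_len]; omega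
    have h2 : ((List.range N).map (fun k => g (k % Rn) (k / Rn))).length ≤ i := by
      simp; omega
    rw [List.getElem?_eq_none h1, List.getElem?_eq_none h2]

lemma portB_eq (bits : List Int) (depth : Int) (h : ¬ depth ≤ 1) :
    block_interleave_alt bits depth =
      (List.range bits.length).map
        (fun k => bits.getD ((k % depth.toNat) * ((bits.length + depth.toNat - 1) / depth.toNat) + k / depth.toNat) 0) := by
  have hR : 0 < depth.toNat := by omega
  have hdep : depth = (depth.toNat : Int) := by omega
  unfold block_interleave_alt
  rw [if_neg h]
  dsimp only
  conv_lhs => rw [hdep]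
  rw [cols_eq bits.length depth.toNat hR, PySem.List.pyRange_zero_natCast, List.foldl_map]
  simp only [PySem.Int.mod_natCast, PySem.Int.floordiv_natCast]
  have hbody : ∀ (out : List Int) (k : Nat),
      out ++ [if ((k % depth.toNat : Nat) : Int) * (((bits.length + depth.toNat - 1) / depth.toNat : Nat) : Int)
                + ((k / depth.toNat : Nat) : Int) < (bits.length : Int)
              then PySem.List.pyGetD bits (((k % depth.toNat : Nat) : Int) * (((bits.length + depth.toNat - 1) / depth.toNat : Nat) : Int)
                + ((k / depth.toNat : Nat) : Int)) 0 else 0]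
      = out ++ [bits.getD ((k % depth.toNat) * ((bits.length + depth.toNat - 1) / depth.toNat) + k / depth.toNat) 0] := by
    intro out k
    congr 1
    have hsrc : ((k % depth.toNat : Nat) : Int) * (((bits.length + depth.toNat - 1) / depth.toNat : Nat) : Int)
        + ((k / depth.toNat : Nat) : Int)
        = (((k % depth.toNat) * ((bits.length + depth.toNat - 1) / depth.toNat) + k / depth.toNat : Nat) : Int) := by
      push_cast; ring
    rw [hsrc, PySem.List.pyGetD_natCast]
    by_cases hlt : (k % depth.toNat) * ((bits.length + depth.toNat - 1) / depth.toNat) + k / depth.toNat < bits.length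
    · rw [if_pos (by exact_mod_cast hlt)]
    · rw [if_neg (by exact_mod_cast hlt), List.getD_eq_default _ _ (by omega)]
  simp only [hbody]
  rw [PySem.List.foldl_append_singleton_eq_map
    (fun k => bits.getD ((k % depth.toNat) * ((bits.length + depth.toNat - 1) / depth.toNat) + k / depth.toNat) 0)
    (List.range bits.length) [], List.nil_append]

lemma portA_eq (bits : List Int) (depth : Int) (h : ¬ depth ≤ 1) :
    block_interleave bits depth =
      ((List.range ((bits.length + depth.toNat - 1) / depth.toNat)).flatMap
        (fun c => (List.range depth.toNat).map
          (fun r => bits.getD (r * ((bits.length + depth.toNat - 1) / depth.toNat) + c) 0))).take bits.length := by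
  have hR : 0 < depth.toNat := by omega
  have hdep : depth = (depth.toNat : Int) := by omega
  unfold block_interleave
  rw [if_neg h]
  dsimp only
  conv_lhs => rw [hdep]
  rw [cols_eq bits.length depth.toNat hR]
  rw [PySem.List.pyRange_zero_natCast depth.toNat,
    PySem.List.pyRange_zero_natCast ((bits.length + depth.toNat - 1) / depth.toNat)]
  simp only [List.foldl_map, List.map_map, Function.comp_def, Int.toNat_natCast,
    List.map_const', List.length_range, PySem.List.pySetD_natCast, PySem.List.pyGetD_natCast,
    PySem.List.slice_to_natCast]
  have hfill := fill_outer bits depth.toNat ((bits.length + depth.toNat - 1) / depth.toNat)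
    depth.toNat 0
    (List.replicate depth.toNat (List.replicate ((bits.length + depth.toNat - 1) / depth.toNat) 0))
    (by omega) (by simp)
    (by intro j _ hj
        rw [List.getD_eq_getElem?_getD, List.getElem?_replicate, if_pos hj, Option.getD_some])
  rw [← List.range_eq_range'] at hfill
  simp only [Nat.zero_mul, Nat.zero_min, Nat.cast_zero, Nat.not_lt_zero, if_false,
    padRow] at hfill
  simp only [show ∀ (r : Nat) (st : List (List Int) × Int) (c : Nat),
      (if st.2 < (bits.length : Int) then
        (st.1.set r ((st.1.getD r []).set c (PySem.List.pyGetD bits st.2 0)), st.2 + 1)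
      else st) = fillStep bits r st c from fun r st c => by simp [fillStep]]
  rw [hfill]
  simp only [PySem.List.foldl_append_singleton_eq_map, PySem.List.foldl_append_eq_flatMap,
    List.nil_append]
  congr 1
  apply List.flatMap_congr
  intro c hc
  apply List.map_congr_left
  intro r hr
  rw [PySem.List.getD_map_range _ _ _ _ (by simpa using hr),
    PySem.List.getD_map_range _ _ _ _ (by simpa using hc)]

-- ===== VERDICT (by name: the statement is the Claim_ definition above) =====
theorem block_interleave_spec : Claim_equal_block_interleave := by
  intro bits depth _
  unfold Spec_block_interleave
  by_cases h : depth ≤ 1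
  · unfold block_interleave block_interleave_alt
    rw [if_pos h, if_pos h]
  · rw [portA_eq bits depth h, portB_eq bits depth h]
    have hR : 0 < depth.toNat := by omega
    have hN : bits.length ≤ ((bits.length + depth.toNat - 1) / depth.toNat) * depth.toNat := by
      rw [Nat.mul_comm]
      exact N_le_RC bits.length depth.toNat hR
    exact interleave_index depth.toNat ((bits.length + depth.toNat - 1) / depth.toNat) bits.length hN
      (fun r c => bits.getD (r * ((bits.length + depth.toNat - 1) / depth.toNat) + c) 0)
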